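-- pv_equiv track=rewrite | github.com/Neurokrem/Casino | Kockarnica/Kockarnica.py | uvjet_pobjede
-- ===== SOURCE A (Python) =====
-- def uvjet_pobjede(stupci, linije, oklada, vrijednosti):
--     pobjede = 0
--     pobjedne_linije = []
--     for linija in range(linije):
--         simbol = stupci[0][linija]
--         for stupac in stupci:
--             symbol_to_check = stupac[linija]
--             if simbol != symbol_to_check:
--                 break
--         else:
--             pobjede += vrijednosti[simbol] * oklada
--             pobjedne_linije.append(linija + 1)
--     return pobjede
-- ===== SOURCE B (Python) =====
-- def uvjet_pobjede(stupci, linije, oklada, vrijednosti):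
--     # column-major: keep a shrinking list of still-matching lines instead of
--     # a break-based per-line scan over the columns
--     simboli = [stupci[0][l] for l in range(linije)]
--     zive = list(range(linije))
--     for stupac in stupci:
--         zive = [l for l in zive if stupac[l] == simboli[l]]
--     return sum(vrijednosti[simboli[l]] for l in zive) * oklada
-- ===== Notes on version B (the rewrite author's own statement) =====
-- stated objective: alternative
-- what changed: Replaces A's line-major traversal (per line, a break-based scan over the columns with for-else) by a column-major traversal that maintains a shrinking list of still-matching lines, filtering it once per column and paying the surviving lines at the end; the unused win-lines list is dropped.
import Mathlib
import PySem

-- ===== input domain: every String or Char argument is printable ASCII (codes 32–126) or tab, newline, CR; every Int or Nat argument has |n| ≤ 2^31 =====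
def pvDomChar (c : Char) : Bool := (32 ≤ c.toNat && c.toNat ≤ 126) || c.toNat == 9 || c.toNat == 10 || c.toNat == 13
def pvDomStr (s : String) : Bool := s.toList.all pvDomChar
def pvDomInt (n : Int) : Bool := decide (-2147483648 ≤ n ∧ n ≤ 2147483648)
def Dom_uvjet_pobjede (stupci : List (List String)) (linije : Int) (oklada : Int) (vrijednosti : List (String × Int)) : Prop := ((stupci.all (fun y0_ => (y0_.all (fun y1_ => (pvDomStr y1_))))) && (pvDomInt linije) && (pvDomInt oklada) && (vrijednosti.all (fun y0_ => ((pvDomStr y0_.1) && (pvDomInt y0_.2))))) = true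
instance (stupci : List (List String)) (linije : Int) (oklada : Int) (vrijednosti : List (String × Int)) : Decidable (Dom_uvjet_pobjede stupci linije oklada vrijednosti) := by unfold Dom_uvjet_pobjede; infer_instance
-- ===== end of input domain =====

-- B replaces A's line-major break-based scan by a column-major pass that filters a shrinking
-- list of still-matching lines, then pays the surviving lines (objective: alternative).

-- ===== PORT A =====
-- inner 'for stupac in stupci: … break / else' loop: returns true iff the else-branch runs
def pvInnerA (simbol : String) (linija : Int) : List (List String) → Bool
  | [] => true
  | stupac :: rest =>
    let symbol_to_check := PySem.List.pyGetD stupac linija ""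
    if simbol ≠ symbol_to_check then false else pvInnerA simbol linija rest

def uvjet_pobjede (stupci : List (List String)) (linije : Int) (oklada : Int) (vrijednosti : List (String × Int)) : Int :=
  let st := (PySem.List.pyRange 0 linije 1).foldl
    (fun (st : Int × List Int) linija =>
      let simbol := PySem.List.pyGetD (PySem.List.pyGetD stupci 0 []) linija ""
      if pvInnerA simbol linija stupci then
        (st.1 + ((PySem.Dict.mk vrijednosti).get? simbol).getD 0 * oklada, st.2 ++ [linija + 1])
      else st)
    (0, ([] : List Int))
  st.1

-- ===== PORT B =====
def uvjet_pobjede_alt (stupci : List (List String)) (linije : Int) (oklada : Int) (vrijednosti : List (String × Int)) : Int :=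
  let simboli := (PySem.List.pyRange 0 linije 1).map
    (fun l => PySem.List.pyGetD (PySem.List.pyGetD stupci 0 []) l "")
  let zive := stupci.foldl
    (fun (zive : List Int) stupac =>
      zive.filter (fun l => PySem.List.pyGetD stupac l "" == PySem.List.pyGetD simboli l ""))
    (PySem.List.pyRange 0 linije 1)
  (zive.foldl (fun s l => s + ((PySem.Dict.mk vrijednosti).get? (PySem.List.pyGetD simboli l "")).getD 0) 0) * oklada

-- ===== PRECONDITION & SPEC =====
-- Pre_ characterizes exactly the inputs on which Python A returns: it excludes the IndexError
-- cases (a cell A's scan actually reaches before its break lies out of range) and the KeyError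
-- case (a fully-matching line whose symbol is not a payout key).
def Pre_uvjet_pobjede (stupci : List (List String)) (linije : Int) (oklada : Int) (vrijednosti : List (String × Int)) : Prop :=
  0 < linije →
  stupci ≠ [] ∧
  linije ≤ ((stupci.headD []).length : Int) ∧
  ∀ l ∈ List.range linije.toNat,
    (∀ j ∈ List.range stupci.length,
       (∀ j' ∈ List.range j,
          l < (stupci.getD j' []).length ∧
          (stupci.getD j' []).getD l "" = (stupci.headD []).getD l "") →
       l < (stupci.getD j []).length) ∧
    ((∀ c ∈ stupci, l < c.length ∧ c.getD l "" = (stupci.headD []).getD l "") →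
       ((PySem.Dict.mk vrijednosti).get? ((stupci.headD []).getD l "")).isSome = true)
instance (stupci : List (List String)) (linije : Int) (oklada : Int) (vrijednosti : List (String × Int)) : Decidable (Pre_uvjet_pobjede stupci linije oklada vrijednosti) := by unfold Pre_uvjet_pobjede; infer_instance

def pvWitness_uvjet_pobjede : List (List String) × Int × Int × (List (String × Int)) :=
  ([["A", "B"], ["A", "C"]], 2, 5, [("A", 10), ("B", 3)])

def Spec_uvjet_pobjede (stupci : List (List String)) (linije : Int) (oklada : Int) (vrijednosti : List (String × Int)) (out : Int) : Prop := out = uvjet_pobjede_alt stupci linije oklada vrijednosti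
instance (stupci : List (List String)) (linije : Int) (oklada : Int) (vrijednosti : List (String × Int)) (out : Int) : Decidable (Spec_uvjet_pobjede stupci linije oklada vrijednosti out) := by unfold Spec_uvjet_pobjede; infer_instance

-- ===== CLAIM (what is proved, stated in full; the proofs are below) =====
def Claim_equal_uvjet_pobjede : Prop := ∀ (stupci : List (List String)) (linije : Int) (oklada : Int) (vrijednosti : List (String × Int)), Dom_uvjet_pobjede stupci linije oklada vrijednosti → Pre_uvjet_pobjede stupci linije oklada vrijednosti → Spec_uvjet_pobjede stupci linije oklada vrijednosti (uvjet_pobjede stupci linije oklada vrijednosti)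

-- ===== LEMMAS AND PROOFS =====

-- String '==' is symmetric
theorem pvBeqComm (a b : String) : (a == b) = (b == a) := by
  by_cases h : a = b
  · simp [h]
  · simp [h, Ne.symm h]

-- A's inner loop is an 'all' scan
theorem pvInnerA_eq_all (simbol : String) (linija : Int) (stupci : List (List String)) :
    pvInnerA simbol linija stupci
      = stupci.all (fun c => simbol == PySem.List.pyGetD c linija "") := by
  induction stupci with
  | nil => rfl
  | cons c rest ih =>
    simp only [pvInnerA, List.all_cons, ← ih]
    by_cases h : simbol = PySem.List.pyGetD c linija "" <;> simp [h]

-- iterated filtering over the columns is one filter by the conjunction of all column tests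
theorem pvFoldFilter (p : List String → Int → Bool) :
    ∀ (cs : List (List String)) (z : List Int),
      cs.foldl (fun z c => z.filter (p c)) z
        = z.filter (fun l => cs.all (fun c => p c l)) := by
  intro cs
  induction cs with
  | nil => intro z; simp
  | cons c rest ih =>
    intro z
    simp only [List.foldl_cons, ih, List.filter_filter, List.all_cons]
    congr 1
    funext l
    by_cases h1 : p c l <;> simp [h1]

-- pulling the start value out of an additive fold
theorem pvSumShift (d : Int → Int) :
    ∀ (L : List Int) (x : Int),
      L.foldl (fun s l => s + d l) x = x + L.foldl (fun s l => s + d l) 0 := by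
  intro L
  induction L with
  | nil => intro x; simp
  | cons a L ih =>
    intro x
    simp only [List.foldl_cons]
    rw [ih (x + d a), ih (0 + d a)]
    ring

-- A's paired conditional fold is (the additive fold over the filtered lines) * oklada
theorem pvFoldA (oklada : Int) (cond : Int → Bool) (d : Int → Int) :
    ∀ (L : List Int) (p : Int) (w : List Int),
      (L.foldl (fun (st : Int × List Int) l =>
          if cond l then (st.1 + d l * oklada, st.2 ++ [l + 1]) else st) (p, w)).1
        = p + ((L.filter cond).foldl (fun s l => s + d l) 0) * oklada := by
  intro L
  induction L with
  | nil => intro p w; simp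
  | cons a L ih =>
    intro p w
    simp only [List.foldl_cons, List.filter_cons]
    by_cases h : cond a
    · simp only [h, if_pos, List.foldl_cons, ih]
      rw [pvSumShift d (List.filter cond L) (0 + d a)]
      ring
    · simp [h, ih]

-- the per-line symbol list of B reads back the head-column symbol
theorem pvSimboli_get (stupci : List (List String)) (linije : Int) (l : Int)
    (h0 : 0 ≤ l) (h1 : l < linije) :
    PySem.List.pyGetD ((PySem.List.pyRange 0 linije 1).map
        (fun l => PySem.List.pyGetD (PySem.List.pyGetD stupci 0 []) l "")) l ""
      = PySem.List.pyGetD (PySem.List.pyGetD stupci 0 []) l "" :=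
  PySem.List.pyGetD_map_pyRange_of_nonneg _ _ _ _ h0 h1

-- ===== VERDICT (by name: the statement is the Claim_ definition above) =====
theorem uvjet_pobjede_spec : Claim_equal_uvjet_pobjede := by
  intro stupci linije oklada vrijednosti _hdom _hpre
  unfold Spec_uvjet_pobjede uvjet_pobjede uvjet_pobjede_alt
  simp only []
  set L := PySem.List.pyRange 0 linije 1 with hL
  set f : Int → String := fun l => PySem.List.pyGetD (PySem.List.pyGetD stupci 0 []) l "" with hf
  set sym' : Int → String := fun l => PySem.List.pyGetD (L.map f) l "" with hsym
  have hsym_eq : ∀ l ∈ L, sym' l = f l := by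
    intro l hl
    obtain ⟨h0, h1⟩ := (PySem.List.mem_pyRange_one).mp hl
    exact pvSimboli_get stupci linije l h0 h1
  -- B side: collapse the column fold to one filter
  rw [pvFoldFilter (fun c l => PySem.List.pyGetD c l "" == sym' l) stupci L]
  -- the filter predicate agrees with A's inner-loop condition on members of L
  have hfilter : L.filter (fun l => stupci.all (fun c => PySem.List.pyGetD c l "" == sym' l))
      = L.filter (fun l => pvInnerA (f l) l stupci) := by
    apply List.filter_congr
    intro l hl
    rw [pvInnerA_eq_all, hsym_eq l hl]
    have : (fun c => PySem.List.pyGetD c l "" == f l) = (fun c => f l == PySem.List.pyGetD c l "") := by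
      funext c; exact pvBeqComm _ _
    rw [this]
  rw [hfilter]
  -- A side: project the paired fold
  rw [pvFoldA oklada (fun l => pvInnerA (f l) l stupci)
      (fun l => ((PySem.Dict.mk vrijednosti).get? (f l)).getD 0) L 0 []]
  -- the payout lookups agree on members of the filtered list
  have hfold : (L.filter (fun l => pvInnerA (f l) l stupci)).foldl
        (fun s l => s + ((PySem.Dict.mk vrijednosti).get? (sym' l)).getD 0) 0
      = (L.filter (fun l => pvInnerA (f l) l stupci)).foldl
        (fun s l => s + ((PySem.Dict.mk vrijednosti).get? (f l)).getD 0) 0 := by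
    apply PySem.List.foldl_congr_mem
    intro acc l hl
    rw [hsym_eq l (List.mem_of_mem_filter hl)]
  rw [hfold]
  ring
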